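-- pv_equiv track=rewrite | github.com/wocame/AED-10-QAP | dev/Algoritmo/branch_bound.py | junta_elementos_complementares
-- ===== SOURCE A (Python) =====
-- def junta_elementos_complementares(n, C_bb):
--     """
--     Junta os elementos complementares na matriz de custo
--
--     :param n: Número de dependências
--     :param C_bb: Matriz de custo N² por N²
--     :return: Matriz de custo com os elementos complementares somados e concentrados nos indices superiores
--     """
--     for i in range(n):
--         for k in range(n):
--             j_branch = [jc for jc in range(n) if jc != i]
--             p_branch = [pc for pc in range(n) if pc != k]
--             for j in j_branch:
--                 for p in p_branch:
--                     if j < i: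
--                         C_bb[i][k][j][p] = 0
--                     else:
--                         C_bb[i][k][j][p] += C_bb[j][p][i][k]
--     return C_bb
-- ===== SOURCE B (Python) =====
-- def junta_elementos_complementares(n, C_bb):
--     """Single pass over the strict upper triangle of the flattened n^2 x n^2 matrix:
--     each complementary pair of cells is visited exactly once via flat row indices a < b,
--     decoded with divmod; the lower cell's value is folded into the upper cell and the
--     lower cell is zeroed, in place (mutates and returns C_bb, like A)."""
--     nn = n * n
--     for a in range(nn):
--         i, k = divmod(a, n)
--         for b in range(a + 1, nn):
--             j, p = divmod(b, n)
--             if j != i and p != k: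
--                 C_bb[i][k][j][p] += C_bb[j][p][i][k]
--                 C_bb[j][p][i][k] = 0
--     return C_bb
-- ===== Notes on version B (the rewrite author's own statement) =====
-- stated objective: alternative
-- what changed: B replaces A's four nested index loops over every ordered quadruple with a single pass over the strict upper triangle of the flattened n^2 x n^2 matrix (two flat-index loops a < b with divmod decoding), handling each complementary pair of cells exactly once with a read-add-zero transfer, instead of A's order-dependent full scan that writes every lower cell to 0 and relies on ascending-i processing to read complements before they are consumed; both mutate C_bb in place and return it.
-- outside the precondition, e.g. on junta_elementos_complementares(-2, []): A returns [], B raises IndexError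
import Mathlib
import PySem

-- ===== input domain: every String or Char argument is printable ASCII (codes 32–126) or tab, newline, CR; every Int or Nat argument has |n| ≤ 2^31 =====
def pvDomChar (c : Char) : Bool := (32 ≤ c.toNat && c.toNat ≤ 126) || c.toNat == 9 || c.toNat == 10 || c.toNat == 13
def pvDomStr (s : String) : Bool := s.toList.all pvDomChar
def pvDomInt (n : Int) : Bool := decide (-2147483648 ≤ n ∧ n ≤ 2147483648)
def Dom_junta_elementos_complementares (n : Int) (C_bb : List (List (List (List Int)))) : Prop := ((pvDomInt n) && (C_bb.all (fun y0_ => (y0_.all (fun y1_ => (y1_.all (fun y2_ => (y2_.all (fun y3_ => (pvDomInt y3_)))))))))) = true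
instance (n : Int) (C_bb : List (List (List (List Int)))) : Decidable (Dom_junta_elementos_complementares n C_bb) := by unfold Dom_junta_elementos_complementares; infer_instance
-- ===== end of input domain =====

-- B replaces A's four nested index loops with a single pass over the strict upper triangle of
-- the flattened n²×n² matrix (flat indices a < b decoded with divmod), transferring each
-- complementary pair once; both A and B mutate C_bb in place and return it (same side effect).

-- ===== PORT A =====
-- Int-index wrappers with Python's negative-index wraparound (xs[-i] = xs[len-i]);
-- on the nonnegative loop indices both ports actually use they coincide with plain toNat.
def pyIdx (len : Nat) (i : Int) : Nat := (if i < 0 then i + (len : Int) else i).toNat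

def get4 (m : List (List (List (List Int)))) (i k j p : Int) : Int :=
  let r1 := m.getD (pyIdx m.length i) []
  let r2 := r1.getD (pyIdx r1.length k) []
  let r3 := r2.getD (pyIdx r2.length j) []
  r3.getD (pyIdx r3.length p) 0

def set4 (m : List (List (List (List Int)))) (i k j p : Int) (v : Int) :
    List (List (List (List Int))) :=
  let a := pyIdx m.length i
  let r1 := m.getD a []
  let b := pyIdx r1.length k
  let r2 := r1.getD b []
  let c := pyIdx r2.length j
  let r3 := r2.getD c []
  let d := pyIdx r3.length p
  m.set a (r1.set b (r2.set c (r3.set d v)))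

def junta_elementos_complementares (n : Int) (C_bb : List (List (List (List Int)))) :
    List (List (List (List Int))) :=
  (PySem.List.pyRange 0 n 1).foldl (fun m i =>
    (PySem.List.pyRange 0 n 1).foldl (fun m k =>
      let j_branch := (PySem.List.pyRange 0 n 1).filter (fun jc => jc != i)
      let p_branch := (PySem.List.pyRange 0 n 1).filter (fun pc => pc != k)
      j_branch.foldl (fun m j =>
        p_branch.foldl (fun m p =>
          if j < i then set4 m i k j p 0
          else set4 m i k j p (get4 m i k j p + get4 m j p i k)) m) m) m) C_bb

-- ===== PORT B =====
-- Source B: for a in range(n*n): i,k = divmod(a,n); for b in range(a+1,n*n): j,p = divmod(b,n);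
--       if j!=i and p!=k: C[i][k][j][p] += C[j][p][i][k]; C[j][p][i][k] = 0
def junta_elementos_complementares_alt (n : Int) (C_bb : List (List (List (List Int)))) :
    List (List (List (List Int))) :=
  let nn := n * n
  (PySem.List.pyRange 0 nn 1).foldl (fun m a =>
    let i := PySem.Int.floordiv a n
    let k := PySem.Int.mod a n
    (PySem.List.pyRange (a + 1) nn 1).foldl (fun m b =>
      let j := PySem.Int.floordiv b n
      let p := PySem.Int.mod b n
      if j ≠ i ∧ p ≠ k then
        set4 (set4 m i k j p (get4 m i k j p + get4 m j p i k)) j p i k 0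
      else m) m) C_bb

-- ===== PRECONDITION & SPEC =====
-- Pre_: the inputs on which A returns (otherwise A raises IndexError), restricted to the
-- natural domain -1 ≤ n (n is a dependency count; for n ≤ -2 A happens to return C_bb
-- unchanged while B's flat-index scan can hit out-of-range indices and raise — see cites).
-- For n <= 1 the inner loops visit nothing, so A always returns; for n >= 2 every list A
-- indexes must be long enough: levels 1-2 need length >= n; a level-3 list C[x][y] is indexed
-- at all j /= x (so length n, or n-1 when x = n-1); a level-4 list C[x][y][z] (z /= x) is
-- indexed at all p /= y (so length n, or n-1 when y = n-1).
def pvShapeOk (N : Nat) (C : List (List (List (List Int)))) : Prop :=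
  N ≤ C.length ∧ ∀ x < N, N ≤ (C.getD x []).length ∧ ∀ y < N,
    (if x = N - 1 then N - 1 else N) ≤ ((C.getD x []).getD y []).length ∧
      ∀ z < N, z ≠ x →
        (if y = N - 1 then N - 1 else N) ≤ (((C.getD x []).getD y []).getD z []).length

def Pre_junta_elementos_complementares (n : Int) (C_bb : List (List (List (List Int)))) : Prop :=
  -1 ≤ n ∧ (n ≤ 1 ∨ pvShapeOk n.toNat C_bb)

instance (n : Int) (C_bb : List (List (List (List Int)))) :
    Decidable (Pre_junta_elementos_complementares n C_bb) := by
  unfold Pre_junta_elementos_complementares pvShapeOk; infer_instance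

def pvWitness_junta_elementos_complementares : Int × List (List (List (List Int))) :=
  (2, [[[[1, 2], [3, 4]], [[5, 6], [7, 8]]], [[[9, 10], [11, 12]], [[13, 14], [15, 16]]]])

def Spec_junta_elementos_complementares (n : Int) (C_bb : List (List (List (List Int)))) (out : List (List (List (List Int)))) : Prop := out = junta_elementos_complementares_alt n C_bb
instance (n : Int) (C_bb : List (List (List (List Int)))) (out : List (List (List (List Int)))) : Decidable (Spec_junta_elementos_complementares n C_bb out) := by unfold Spec_junta_elementos_complementares; infer_instance

-- ===== CLAIM (what is proved, stated in full; the proofs are below) =====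
def Claim_equal_junta_elementos_complementares : Prop := ∀ (n : Int) (C_bb : List (List (List (List Int)))), Dom_junta_elementos_complementares n C_bb → Pre_junta_elementos_complementares n C_bb → Spec_junta_elementos_complementares n C_bb (junta_elementos_complementares n C_bb)

-- ===== LEMMAS AND PROOFS =====

-- Nat-index read/write used by the proofs (the ports' get4/set4 on the nonnegative
-- in-range indices the loops produce).
def get4N (m : List (List (List (List Int)))) (a b c d : Nat) : Int :=
  (((m.getD a []).getD b []).getD c []).getD d 0

def set4N (m : List (List (List (List Int)))) (a b c d : Nat) (v : Int) :
    List (List (List (List Int))) :=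
  m.set a ((m.getD a []).set b (((m.getD a []).getD b []).set c
    ((((m.getD a []).getD b []).getD c []).set d v)))

-- Generic 4-level cell machinery used by both sides of the proof.
def mapCells (C : List (List (List (List Int)))) (f : Nat → Nat → Nat → Nat → Int → Int) :
    List (List (List (List Int))) :=
  C.mapIdx (fun a row => row.mapIdx (fun b mat => mat.mapIdx (fun c vec =>
    vec.mapIdx (fun d v => f a b c d v))))

def InR4 (C : List (List (List (List Int)))) (a b c d : Nat) : Prop :=
  a < C.length ∧ b < (C.getD a []).length ∧ c < ((C.getD a []).getD b []).length ∧
    d < (((C.getD a []).getD b []).getD c []).length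

def SameShape (m C : List (List (List (List Int)))) : Prop :=
  m.length = C.length ∧ ∀ a, (m.getD a []).length = (C.getD a []).length ∧
    ∀ b, ((m.getD a []).getD b []).length = ((C.getD a []).getD b []).length ∧
      ∀ c, (((m.getD a []).getD b []).getD c []).length = (((C.getD a []).getD b []).getD c []).length

lemma mapIdx_id' {α : Type} (l : List α) : l.mapIdx (fun _ x => x) = l := by
  induction l with
  | nil => rfl
  | cons x xs ih => simp [List.mapIdx_cons, ih]

lemma mapCells_id (C : List (List (List (List Int)))) :
    mapCells C (fun _ _ _ _ v => v) = C := by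
  simp [mapCells, mapIdx_id']

lemma mapCells_congr (C : List (List (List (List Int))))
    (f g : Nat → Nat → Nat → Nat → Int → Int)
    (h : ∀ a b c d v, f a b c d v = g a b c d v) : mapCells C f = mapCells C g := by
  have hfg : f = g := by funext a b c d v; exact h a b c d v
  rw [hfg]

lemma getD_set' {α : Type} (l : List α) (i j : Nat) (x d : α) :
    (l.set i x).getD j d = if i = j ∧ i < l.length then x else l.getD j d := by
  rw [List.getD_eq_getElem?_getD, List.getElem?_set, List.getD_eq_getElem?_getD]
  by_cases h : i = j
  · subst h
    by_cases h2 : i < l.length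
    · simp [h2]
    · simp [h2]
  · simp [h]

lemma getD_mapIdx_nil {α β : Type} (l : List (List α)) (f : Nat → List α → List β)
    (h : ∀ i, f i [] = []) (i : Nat) : (l.mapIdx f).getD i [] = f i (l.getD i []) := by
  rw [List.getD_eq_getElem?_getD, List.getD_eq_getElem?_getD, List.getElem?_mapIdx]
  cases l[i]? <;> simp [h]

lemma mapCells_getD (C : List (List (List (List Int)))) (f : Nat → Nat → Nat → Nat → Int → Int)
    (a : Nat) :
    (mapCells C f).getD a [] = (C.getD a []).mapIdx (fun b mat => mat.mapIdx (fun c vec =>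
      vec.mapIdx (fun d v => f a b c d v))) := by
  unfold mapCells
  rw [getD_mapIdx_nil]
  intro i; rfl

lemma get4N_of_not (m : List (List (List (List Int)))) (a b c d : Nat)
    (h : ¬ InR4 m a b c d) : get4N m a b c d = 0 := by
  unfold InR4 at h
  unfold get4N
  by_cases h1 : a < m.length
  · by_cases h2 : b < (m.getD a []).length
    · by_cases h3 : c < ((m.getD a []).getD b []).length
      · have h4 : ¬ d < (((m.getD a []).getD b []).getD c []).length :=
          fun h4 => h ⟨h1, h2, h3, h4⟩
        exact List.getD_eq_default (((m.getD a []).getD b []).getD c []) 0 (by omega)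
      · have e : ((m.getD a []).getD b []).getD c [] = [] :=
          List.getD_eq_default _ _ (by omega)
        rw [e]; rfl
    · have e : (m.getD a []).getD b [] = [] := List.getD_eq_default _ _ (by omega)
      rw [e]; rfl
  · have e : m.getD a [] = [] := List.getD_eq_default _ _ (by omega)
    rw [e]; rfl

lemma get4N_mapCells_of_inR4 (C : List (List (List (List Int))))
    (f : Nat → Nat → Nat → Nat → Int → Int) (a b c d : Nat) (hr : InR4 C a b c d) :
    get4N (mapCells C f) a b c d = f a b c d (get4N C a b c d) := by
  unfold get4N
  rw [mapCells_getD, getD_mapIdx_nil _ _ (fun _ => rfl), getD_mapIdx_nil _ _ (fun _ => rfl)]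
  conv_lhs => rw [List.getD_eq_getElem?_getD, List.getElem?_mapIdx]
  rw [List.getElem?_eq_getElem hr.2.2.2]
  have hd := hr.2.2.2
  simp only [List.getD_eq_getElem?_getD] at hd ⊢
  simp [List.getElem?_eq_getElem hd]

lemma sameShape_mapCells (C : List (List (List (List Int))))
    (f : Nat → Nat → Nat → Nat → Int → Int) : SameShape (mapCells C f) C := by
  refine ⟨List.length_mapIdx, fun a => ?_⟩
  rw [mapCells_getD]
  refine ⟨List.length_mapIdx, fun b => ?_⟩
  rw [getD_mapIdx_nil _ _ (fun _ => rfl)]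
  refine ⟨List.length_mapIdx, fun c => ?_⟩
  rw [getD_mapIdx_nil _ _ (fun _ => rfl)]
  exact List.length_mapIdx

lemma sameShape_set4N (m : List (List (List (List Int)))) (a b c d : Nat) (v : Int) :
    SameShape (set4N m a b c d v) m := by
  unfold SameShape set4N
  refine ⟨List.length_set, fun x => ?_⟩
  rw [getD_set']
  split_ifs with h1
  · obtain ⟨rfl, _⟩ := h1
    refine ⟨List.length_set, fun y => ?_⟩
    rw [getD_set']
    split_ifs with h2
    · obtain ⟨rfl, _⟩ := h2
      refine ⟨List.length_set, fun z => ?_⟩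
      rw [getD_set']
      split_ifs with h3
      · obtain ⟨rfl, _⟩ := h3
        exact List.length_set
      · rfl
    · exact ⟨rfl, fun z => rfl⟩
  · exact ⟨rfl, fun y => ⟨rfl, fun z => rfl⟩⟩

lemma sameShape_trans {m₁ m₂ m₃ : List (List (List (List Int)))}
    (h1 : SameShape m₁ m₂) (h2 : SameShape m₂ m₃) : SameShape m₁ m₃ := by
  exact ⟨h1.1.trans h2.1, fun a => ⟨((h1.2 a).1).trans ((h2.2 a).1),
    fun b => ⟨(((h1.2 a).2 b).1).trans (((h2.2 a).2 b).1),
      fun c => ((((h1.2 a).2 b).2 c)).trans ((((h2.2 a).2 b).2 c))⟩⟩⟩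

lemma sameShape_symm {m C : List (List (List (List Int)))} (h : SameShape m C) :
    SameShape C m :=
  ⟨h.1.symm, fun a => ⟨((h.2 a).1).symm, fun b => ⟨(((h.2 a).2 b).1).symm,
    fun c => ((((h.2 a).2 b).2 c)).symm⟩⟩⟩

lemma inR4_of_sameShape {m C : List (List (List (List Int)))} (h : SameShape m C)
    {a b c d : Nat} (hr : InR4 C a b c d) : InR4 m a b c d := by
  exact ⟨h.1 ▸ hr.1, ((h.2 a).1) ▸ hr.2.1, (((h.2 a).2 b).1) ▸ hr.2.2.1,
    ((((h.2 a).2 b).2 c)) ▸ hr.2.2.2⟩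

lemma get4N_mapCells_of_not (C : List (List (List (List Int))))
    (f : Nat → Nat → Nat → Nat → Int → Int) (a b c d : Nat) (h : ¬ InR4 C a b c d) :
    get4N (mapCells C f) a b c d = 0 := by
  apply get4N_of_not
  intro hr
  exact h (inR4_of_sameShape (sameShape_symm (sameShape_mapCells C f)) hr)

lemma get4N_set4N_self (m : List (List (List (List Int)))) (a b c d : Nat) (v : Int)
    (hr : InR4 m a b c d) : get4N (set4N m a b c d v) a b c d = v := by
  obtain ⟨h1, h2, h3, h4⟩ := hr
  unfold get4N set4N
  rw [getD_set', if_pos ⟨rfl, h1⟩, getD_set', if_pos ⟨rfl, h2⟩,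
    getD_set', if_pos ⟨rfl, h3⟩, getD_set', if_pos ⟨rfl, h4⟩]

lemma get4N_set4N_ne (m : List (List (List (List Int)))) (a b c d a' b' c' d' : Nat) (v : Int)
    (hne : (a', b', c', d') ≠ (a, b, c, d)) :
    get4N (set4N m a b c d v) a' b' c' d' = get4N m a' b' c' d' := by
  unfold get4N set4N
  rw [getD_set']
  split_ifs with h1
  · obtain ⟨rfl, _⟩ := h1
    rw [getD_set']
    split_ifs with h2
    · obtain ⟨rfl, _⟩ := h2
      rw [getD_set']
      split_ifs with h3
      · obtain ⟨rfl, _⟩ := h3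
        rw [getD_set']
        split_ifs with h4
        · obtain ⟨rfl, _⟩ := h4
          exact absurd rfl hne
        · rfl
      · rfl
    · rfl
  · rfl

lemma mat4_ext {m m' : List (List (List (List Int)))} (hs : SameShape m m')
    (hv : ∀ a b c d, get4N m a b c d = get4N m' a b c d) : m = m' := by
  apply List.ext_getElem hs.1
  intro a ha1 ha2
  apply List.ext_getElem
  · have := (hs.2 a).1
    rwa [List.getD_eq_getElem _ _ ha1, List.getD_eq_getElem _ _ ha2] at this
  intro b hb1 hb2
  apply List.ext_getElem
  · have := ((hs.2 a).2 b).1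
    rwa [List.getD_eq_getElem _ _ ha1, List.getD_eq_getElem _ _ ha2,
      List.getD_eq_getElem _ _ hb1, List.getD_eq_getElem _ _ hb2] at this
  intro c hc1 hc2
  apply List.ext_getElem
  · have := ((hs.2 a).2 b).2 c
    rwa [List.getD_eq_getElem _ _ ha1, List.getD_eq_getElem _ _ ha2,
      List.getD_eq_getElem _ _ hb1, List.getD_eq_getElem _ _ hb2,
      List.getD_eq_getElem _ _ hc1, List.getD_eq_getElem _ _ hc2] at this
  intro d hd1 hd2
  have := hv a b c d
  unfold get4N at this
  rwa [List.getD_eq_getElem _ _ ha1, List.getD_eq_getElem _ _ ha2,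
    List.getD_eq_getElem _ _ hb1, List.getD_eq_getElem _ _ hb2,
    List.getD_eq_getElem _ _ hc1, List.getD_eq_getElem _ _ hc2,
    List.getD_eq_getElem _ _ hd1, List.getD_eq_getElem _ _ hd2] at this

-- ---------- A side: quadruple list, closed form, fold invariant ----------

def qlt (x y : Nat × Nat × Nat × Nat) : Prop :=
  x.1 < y.1 ∨ (x.1 = y.1 ∧ (x.2.1 < y.2.1 ∨ (x.2.1 = y.2.1 ∧
    (x.2.2.1 < y.2.2.1 ∨ (x.2.2.1 = y.2.2.1 ∧ x.2.2.2 < y.2.2.2)))))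

def quadsN (N : Nat) : List (Nat × Nat × Nat × Nat) :=
  (List.range N).flatMap (fun i => (List.range N).flatMap (fun k =>
    ((List.range N).filter (fun j => j != i)).flatMap (fun j =>
      ((List.range N).filter (fun p => p != k)).map (fun p => (i, k, j, p)))))

def stepN (m : List (List (List (List Int)))) (q : Nat × Nat × Nat × Nat) :
    List (List (List (List Int))) :=
  if q.2.2.1 < q.1 then set4N m q.1 q.2.1 q.2.2.1 q.2.2.2 0
  else set4N m q.1 q.2.1 q.2.2.1 q.2.2.2
    (get4N m q.1 q.2.1 q.2.2.1 q.2.2.2 + get4N m q.2.2.1 q.2.2.2 q.1 q.2.1)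

def updCell (C : List (List (List (List Int)))) (P : List (Nat × Nat × Nat × Nat))
    (a b c d : Nat) (v : Int) : Int :=
  if (a, b, c, d) ∈ P then (if c < a then 0 else v + get4N C c d a b) else v

def upd (C : List (List (List (List Int)))) (P : List (Nat × Nat × Nat × Nat)) :
    List (List (List (List Int))) :=
  mapCells C (updCell C P)

lemma get4N_upd_not_mem (C : List (List (List (List Int)))) (P : List (Nat × Nat × Nat × Nat))
    (a b c d : Nat) (h : (a, b, c, d) ∉ P) : get4N (upd C P) a b c d = get4N C a b c d := by
  by_cases hr : InR4 C a b c d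
  · rw [upd, get4N_mapCells_of_inR4 _ _ _ _ _ _ hr]
    simp [updCell, h]
  · rw [upd, get4N_mapCells_of_not _ _ _ _ _ _ hr, get4N_of_not _ _ _ _ _ hr]

lemma get4N_upd_mem (C : List (List (List (List Int)))) (P : List (Nat × Nat × Nat × Nat))
    (a b c d : Nat) (h : (a, b, c, d) ∈ P) (hr : InR4 C a b c d) :
    get4N (upd C P) a b c d = if c < a then 0 else get4N C a b c d + get4N C c d a b := by
  rw [upd, get4N_mapCells_of_inR4 _ _ _ _ _ _ hr]
  simp [updCell, h]

lemma upd_nil (C : List (List (List (List Int)))) : upd C [] = C := by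
  unfold upd
  rw [mapCells_congr C _ (fun _ _ _ _ v => v) (by intro a b c d v; simp [updCell]),
    mapCells_id]

lemma mem_quadsN {N i k j p : Nat} :
    (i, k, j, p) ∈ quadsN N ↔ i < N ∧ k < N ∧ j < N ∧ j ≠ i ∧ p < N ∧ p ≠ k := by
  simp [quadsN, List.mem_flatMap, List.mem_filter, List.mem_map, List.mem_range, Prod.ext_iff]
  tauto

lemma pairwise_quadsN (N : Nat) : (quadsN N).Pairwise qlt := by
  unfold quadsN
  rw [List.pairwise_flatMap]
  constructor
  · intro i _
    rw [List.pairwise_flatMap]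
    constructor
    · intro k _
      rw [List.pairwise_flatMap]
      constructor
      · intro j _
        rw [List.pairwise_map]
        refine (List.pairwise_lt_range.filter _).imp ?_
        intro p p' hlt
        simp [qlt]; omega
      · refine (List.pairwise_lt_range.filter _).imp ?_
        intro j j' hlt x hx y hy
        simp only [List.mem_map] at hx hy
        obtain ⟨px, _, rfl⟩ := hx
        obtain ⟨py, _, rfl⟩ := hy
        simp [qlt]; omega
    · refine List.pairwise_lt_range.imp ?_
      intro k k' hlt x hx y hy
      simp only [List.mem_flatMap, List.mem_map] at hx hy
      obtain ⟨jx, _, px, _, rfl⟩ := hx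
      obtain ⟨jy, _, py, _, rfl⟩ := hy
      simp [qlt]; omega
  · refine List.pairwise_lt_range.imp ?_
    intro i i' hlt x hx y hy
    simp only [List.mem_flatMap, List.mem_map] at hx hy
    obtain ⟨kx, _, jx, _, px, _, rfl⟩ := hx
    obtain ⟨ky, _, jy, _, py, _, rfl⟩ := hy
    simp [qlt]; omega

lemma inR4_of_quad {N : Nat} {C : List (List (List (List Int)))} (h : pvShapeOk N C)
    {a b c d : Nat} (ha : a < N) (hb : b < N) (hc : c < N) (hca : c ≠ a)
    (hd : d < N) (hdb : d ≠ b) : InR4 C a b c d := by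
  obtain ⟨h1, hP⟩ := h
  obtain ⟨h2, hQ⟩ := hP a ha
  obtain ⟨h3, hR⟩ := hQ b hb
  have h4 := hR c hc hca
  refine ⟨by omega, by omega, ?_, ?_⟩
  · split_ifs at h3 <;> omega
  · split_ifs at h4 <;> omega

lemma step_upd (C : List (List (List (List Int)))) (P : List (Nat × Nat × Nat × Nat))
    (i k j p : Nat) (hri : InR4 C i k j p) (hrj : InR4 C j p i k)
    (hqP : (i, k, j, p) ∉ P) (hcomp : i < j → (j, p, i, k) ∉ P)
    (hmemP : ∀ x ∈ P, InR4 C x.1 x.2.1 x.2.2.1 x.2.2.2) (hne : j ≠ i) :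
    stepN (upd C P) (i, k, j, p) = upd C (P ++ [(i, k, j, p)]) := by
  have hs : SameShape (upd C P) C := sameShape_mapCells C _
  apply mat4_ext
  · unfold stepN
    split_ifs <;>
      exact sameShape_trans (sameShape_trans (sameShape_set4N _ _ _ _ _ _) hs)
        (sameShape_symm (sameShape_mapCells C _))
  · intro a b c d
    by_cases hq : (a, b, c, d) = (i, k, j, p)
    · have heq : a = i ∧ b = k ∧ c = j ∧ d = p := by simpa [Prod.ext_iff] using hq
      obtain ⟨rfl, rfl, rfl, rfl⟩ := heq
      unfold stepN
      dsimp only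
      have hru : InR4 (upd C P) a b c d := inR4_of_sameShape hs hri
      by_cases hlt : c < a
      · rw [if_pos hlt, get4N_set4N_self _ _ _ _ _ _ hru,
          get4N_upd_mem _ _ _ _ _ _ (by simp) hri, if_pos hlt]
      · have hij : a < c := by omega
        rw [if_neg hlt, get4N_set4N_self _ _ _ _ _ _ hru,
          get4N_upd_not_mem _ _ _ _ _ _ hqP, get4N_upd_not_mem _ _ _ _ _ _ (hcomp hij),
          get4N_upd_mem _ _ _ _ _ _ (by simp) hri, if_neg hlt]
    · unfold stepN
      dsimp only
      have hstep : ∀ v, get4N (set4N (upd C P) i k j p v) a b c d = get4N (upd C P) a b c d :=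
        fun v => get4N_set4N_ne _ _ _ _ _ _ _ _ _ _ hq
      split_ifs <;> rw [hstep] <;> clear hstep
      all_goals {
        by_cases hm : (a, b, c, d) ∈ P
        · rw [get4N_upd_mem _ _ _ _ _ _ hm (hmemP _ hm),
            get4N_upd_mem _ _ _ _ _ _ (List.mem_append_left _ hm) (hmemP _ hm)]
        · have hm2 : (a, b, c, d) ∉ P ++ [(i, k, j, p)] := by simp [hm, hq]
          rw [get4N_upd_not_mem _ _ _ _ _ _ hm, get4N_upd_not_mem _ _ _ _ _ _ hm2] }

lemma quadsN_le_one (N : Nat) (h : N ≤ 1) : quadsN N = [] := by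
  have h01 : N = 0 ∨ N = 1 := by omega
  rcases h01 with rfl | rfl <;> rfl

lemma fold_inv {N : Nat} (C : List (List (List (List Int)))) (hSh : pvShapeOk N C) :
    ∀ (S P : List (Nat × Nat × Nat × Nat)), quadsN N = P ++ S →
      S.foldl stepN (upd C P) = upd C (P ++ S) := by
  intro S
  induction S with
  | nil => intro P h; simp
  | cons q S' ih =>
    intro P hPS
    obtain ⟨i, k, j, p⟩ := q
    have hmemq : (i, k, j, p) ∈ quadsN N := by
      rw [hPS]; exact List.mem_append_right _ (List.mem_cons_self ..)
    have hb := mem_quadsN.mp hmemq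
    have hpw := pairwise_quadsN N
    rw [hPS, List.pairwise_append] at hpw
    have hcross := hpw.2.2
    have hqP : (i, k, j, p) ∉ P := by
      intro hmem
      have := hcross _ hmem _ (List.mem_cons_self ..)
      simp [qlt] at this
    have hcomp : i < j → (j, p, i, k) ∉ P := by
      intro hij hmem
      have := hcross _ hmem _ (List.mem_cons_self ..)
      simp [qlt] at this; omega
    have hmemP : ∀ x ∈ P, InR4 C x.1 x.2.1 x.2.2.1 x.2.2.2 := by
      intro x hx
      have hxq : x ∈ quadsN N := by rw [hPS]; exact List.mem_append_left _ hx
      obtain ⟨x1, x2, x3, x4⟩ := x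
      have hbx := mem_quadsN.mp hxq
      exact inR4_of_quad hSh hbx.1 hbx.2.1 hbx.2.2.1 hbx.2.2.2.1 hbx.2.2.2.2.1 hbx.2.2.2.2.2
    have hri := inR4_of_quad hSh hb.1 hb.2.1 hb.2.2.1 hb.2.2.2.1 hb.2.2.2.2.1 hb.2.2.2.2.2
    have hrj := inR4_of_quad hSh hb.2.2.1 hb.2.2.2.2.1 hb.1 hb.2.2.2.1.symm hb.2.1
      hb.2.2.2.2.2.symm
    rw [List.foldl_cons, step_upd C P i k j p hri hrj hqP hcomp hmemP hb.2.2.2.1]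
    have hAssoc := ih (P ++ [(i, k, j, p)]) (by rw [hPS]; simp)
    rw [hAssoc]; simp

lemma pyIdx_natCast (len a : Nat) : pyIdx len (a : Int) = a := by
  unfold pyIdx
  rw [if_neg (by omega)]
  omega

lemma get4_natCast (m : List (List (List (List Int)))) (a b c d : Nat) :
    get4 m (a : Int) (b : Int) (c : Int) (d : Int) = get4N m a b c d := by
  simp [get4, get4N, pyIdx_natCast]

lemma set4_natCast (m : List (List (List (List Int)))) (a b c d : Nat) (v : Int) :
    set4 m (a : Int) (b : Int) (c : Int) (d : Int) v = set4N m a b c d v := by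
  simp [set4, set4N, pyIdx_natCast]

lemma natCast_bne (a b : Nat) : (((a : Int)) != ((b : Int))) = (a != b) := by
  by_cases h : a = b
  · subst h; simp only [bne_self_eq_false]
  · have h2 : (a : Int) ≠ b := by exact_mod_cast h
    have e1 : (((a : Int)) == ((b : Int))) = false := by simpa using h2
    have e2 : (a == b) = false := by simpa using h
    simp [bne, e1, e2]

lemma A_eq_fold (n : Int) (C : List (List (List (List Int)))) :
    junta_elementos_complementares n C = (quadsN n.toNat).foldl stepN C := by
  by_cases hn : n ≤ 0
  · have h1 : PySem.List.pyRange 0 n 1 = [] := PySem.List.pyRange_one_eq_nil hn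
    have h2 : n.toNat = 0 := by omega
    simp [junta_elementos_complementares, h1, h2, quadsN]
  · have hn' : 0 ≤ n := by omega
    obtain ⟨N, rfl⟩ : ∃ N : Nat, n = N := ⟨n.toNat, (Int.toNat_of_nonneg hn').symm⟩
    unfold junta_elementos_complementares quadsN stepN
    simp only [PySem.List.pyRange_zero_natCast, Int.toNat_natCast, List.filter_map,
      Function.comp_def, natCast_bne, List.foldl_map, List.foldl_flatMap,
      get4_natCast, set4_natCast, Nat.cast_lt]

-- ---------- B side: flat pair list, closed form, fold invariant ----------

def plt (x y : Nat × Nat) : Prop := x.1 < y.1 ∨ (x.1 = y.1 ∧ x.2 < y.2)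

def PBpairs (N : Nat) : List (Nat × Nat) :=
  (List.range (N * N)).flatMap (fun a =>
    (List.range (N * N - (a + 1))).map (fun t => (a, a + 1 + t)))

def stepP (N : Nat) (m : List (List (List (List Int)))) (q : Nat × Nat) :
    List (List (List (List Int))) :=
  if q.2 / N ≠ q.1 / N ∧ q.2 % N ≠ q.1 % N then
    set4N (set4N m (q.1 / N) (q.1 % N) (q.2 / N) (q.2 % N)
      (get4N m (q.1 / N) (q.1 % N) (q.2 / N) (q.2 % N) +
        get4N m (q.2 / N) (q.2 % N) (q.1 / N) (q.1 % N)))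
      (q.2 / N) (q.2 % N) (q.1 / N) (q.1 % N) 0
  else m

def cellB (C : List (List (List (List Int)))) (N : Nat) (P : List (Nat × Nat))
    (x y z w : Nat) (v : Int) : Int :=
  if y < N ∧ w < N ∧ z ≠ x ∧ w ≠ y ∧ (x * N + y, z * N + w) ∈ P then v + get4N C z w x y
  else if y < N ∧ w < N ∧ x ≠ z ∧ y ≠ w ∧ (z * N + w, x * N + y) ∈ P then 0
  else v

def updB (C : List (List (List (List Int)))) (N : Nat) (P : List (Nat × Nat)) :
    List (List (List (List Int))) :=
  mapCells C (cellB C N P)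

lemma mem_PBpairs {N u v : Nat} : (u, v) ∈ PBpairs N ↔ u < v ∧ v < N * N := by
  simp only [PBpairs, List.mem_flatMap, List.mem_map, List.mem_range, Prod.mk.injEq]
  constructor
  · rintro ⟨a, ha, t, ht, rfl, rfl⟩; omega
  · rintro ⟨h1, h2⟩; exact ⟨u, by omega, v - (u + 1), by omega, rfl, by omega⟩

lemma pairwise_PBpairs (N : Nat) : (PBpairs N).Pairwise plt := by
  unfold PBpairs
  rw [List.pairwise_flatMap]
  constructor
  · intro a _
    rw [List.pairwise_map]
    refine List.pairwise_lt_range.imp ?_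
    intro t t' hlt
    simp [plt]; omega
  · refine List.pairwise_lt_range.imp ?_
    intro a a' hlt x hx y hy
    simp only [List.mem_map, List.mem_range] at hx hy
    obtain ⟨tx, _, rfl⟩ := hx
    obtain ⟨ty, _, rfl⟩ := hy
    simp [plt]; omega

lemma encode_div_mod {N x y : Nat} (hy : y < N) : (x * N + y) / N = x ∧ (x * N + y) % N = y := by
  constructor
  · rw [Nat.mul_comm, Nat.mul_add_div (by omega)]
    simp [Nat.div_eq_of_lt hy]
  · rw [Nat.mul_comm, Nat.mul_add_mod]
    exact Nat.mod_eq_of_lt hy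

lemma decode_encode {N a : Nat} (hN : 0 < N) : (a / N) * N + a % N = a := by
  have := Nat.div_add_mod a N
  calc (a / N) * N + a % N = N * (a / N) + a % N := by rw [Nat.mul_comm]
    _ = a := this

lemma encode_lt_iff {N x y z w : Nat} (hzx : z ≠ x) (hy : y < N) (hw : w < N) :
    x * N + y < z * N + w ↔ x < z := by
  constructor
  · intro h
    by_contra hc
    push_neg at hc
    have hzlt : z < x := by omega
    have : z * N + w < x * N + y := by
      calc z * N + w < z * N + N := by omega
        _ = (z + 1) * N := by ring
        _ ≤ x * N := Nat.mul_le_mul_right N (by omega)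
        _ ≤ x * N + y := by omega
    omega
  · intro h
    calc x * N + y < x * N + N := by omega
      _ = (x + 1) * N := by ring
      _ ≤ z * N := Nat.mul_le_mul_right N (by omega)
      _ ≤ z * N + w := by omega

lemma encode_lt_sq {N z w : Nat} (hw : w < N) : z * N + w < N * N ↔ z < N := by
  constructor
  · intro h
    by_contra hc
    push_neg at hc
    have : N * N ≤ z * N := Nat.mul_le_mul_right N hc
    omega
  · intro h
    calc z * N + w < z * N + N := by omega
      _ = (z + 1) * N := by ring
      _ ≤ N * N := Nat.mul_le_mul_right N (by omega)

lemma cellB_identity (C : List (List (List (List Int)))) (N : Nat) (P : List (Nat × Nat))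
    (x y z w : Nat)
    (h1 : ¬ (y < N ∧ w < N ∧ z ≠ x ∧ w ≠ y ∧ (x * N + y, z * N + w) ∈ P))
    (h2 : ¬ (y < N ∧ w < N ∧ x ≠ z ∧ y ≠ w ∧ (z * N + w, x * N + y) ∈ P)) (v : Int) :
    cellB C N P x y z w v = v := by
  unfold cellB
  rw [if_neg h1, if_neg h2]

lemma get4N_updB_congr (C : List (List (List (List Int)))) (N : Nat)
    (P P' : List (Nat × Nat)) (x y z w : Nat)
    (h : ∀ v, cellB C N P x y z w v = cellB C N P' x y z w v) :
    get4N (updB C N P) x y z w = get4N (updB C N P') x y z w := by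
  by_cases hr : InR4 C x y z w
  · rw [updB, updB, get4N_mapCells_of_inR4 _ _ _ _ _ _ hr,
      get4N_mapCells_of_inR4 _ _ _ _ _ _ hr, h]
  · rw [updB, updB, get4N_mapCells_of_not _ _ _ _ _ _ hr, get4N_mapCells_of_not _ _ _ _ _ _ hr]

lemma get4N_updB_id (C : List (List (List (List Int)))) (N : Nat) (P : List (Nat × Nat))
    (x y z w : Nat) (h : ∀ v, cellB C N P x y z w v = v) :
    get4N (updB C N P) x y z w = get4N C x y z w := by
  by_cases hr : InR4 C x y z w
  · rw [updB, get4N_mapCells_of_inR4 _ _ _ _ _ _ hr, h]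
  · rw [updB, get4N_mapCells_of_not _ _ _ _ _ _ hr, get4N_of_not _ _ _ _ _ hr]



lemma encode_inj {N x y x' y' : Nat} (hy : y < N) (hy' : y' < N)
    (h : x * N + y = x' * N + y') : x = x' ∧ y = y' := by
  have h1 : x = x' := by
    have e1 := (encode_div_mod (N := N) (x := x) (y := y) hy).1
    have e2 := (encode_div_mod (N := N) (x := x') (y := y') hy').1
    rw [← e1, ← e2, h]
  refine ⟨h1, ?_⟩
  subst h1
  omega

lemma stepP_updB (C : List (List (List (List Int)))) (N : Nat) (P : List (Nat × Nat))
    (i k j p : Nat) (hkN : k < N) (hpN : p < N) (hiN : i < N) (hjN : j < N)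
    (hab : i * N + k < j * N + p) (hSh : pvShapeOk N C)
    (hPsub : ∀ x ∈ P, x.1 < x.2 ∧ x.2 < N * N)
    (hqP : (i * N + k, j * N + p) ∉ P) :
    stepP N (updB C N P) (i * N + k, j * N + p) = updB C N (P ++ [(i * N + k, j * N + p)]) := by
  have hba_notP : (j * N + p, i * N + k) ∉ P := by
    intro hmem
    exact absurd (hPsub _ hmem).1 (Nat.lt_asymm hab)
  have hij : i ≤ j := by
    by_contra hc
    push_neg at hc
    have := (encode_lt_iff (show i ≠ j by omega) hpN hkN).mpr hc
    exact absurd this (Nat.lt_asymm hab)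
  have ed1 := encode_div_mod (N := N) (x := i) (y := k) hkN
  have ed2 := encode_div_mod (N := N) (x := j) (y := p) hpN
  unfold stepP
  dsimp only
  rw [ed1.1, ed1.2, ed2.1, ed2.2]
  by_cases hcond : j ≠ i ∧ p ≠ k
  · have hilt : i < j := by omega
    have hri : InR4 C i k j p := inR4_of_quad hSh hiN hkN hjN (by omega) hpN hcond.2
    have hrj : InR4 C j p i k := inR4_of_quad hSh hjN hpN hiN (by omega) hkN
      (fun hc => hcond.2 hc.symm)
    have hsP : SameShape (updB C N P) C := sameShape_mapCells C _
    rw [if_pos hcond]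
    have hread_ik : get4N (updB C N P) i k j p = get4N C i k j p := by
      apply get4N_updB_id
      intro v
      apply cellB_identity
      · rintro ⟨_, _, _, _, hmem⟩
        exact hqP hmem
      · rintro ⟨_, _, _, _, hmem⟩
        exact hba_notP hmem
    have hread_jp : get4N (updB C N P) j p i k = get4N C j p i k := by
      apply get4N_updB_id
      intro v
      apply cellB_identity
      · rintro ⟨_, _, _, _, hmem⟩
        exact hba_notP hmem
      · rintro ⟨_, _, _, _, hmem⟩
        exact hqP hmem
    apply mat4_ext
    · exact sameShape_trans
        (sameShape_trans (sameShape_set4N _ _ _ _ _ _)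
          (sameShape_trans (sameShape_set4N _ _ _ _ _ _) hsP))
        (sameShape_symm (sameShape_mapCells C _))
    · intro x y z w
      by_cases hq1 : (x, y, z, w) = (j, p, i, k)
      · obtain ⟨rfl, rfl, rfl, rfl⟩ : x = j ∧ y = p ∧ z = i ∧ w = k := by
          simpa [Prod.ext_iff] using hq1
        have hru : InR4 (set4N (updB C N P) z w x y
            (get4N (updB C N P) z w x y + get4N (updB C N P) x y z w)) x y z w :=
          inR4_of_sameShape (sameShape_trans (sameShape_set4N _ _ _ _ _ _) hsP) hrj
        rw [get4N_set4N_self _ _ _ _ _ _ hru]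
        rw [updB, get4N_mapCells_of_inR4 _ _ _ _ _ _ hrj]
        unfold cellB
        rw [if_neg, if_pos]
        · exact ⟨hpN, hkN, by omega, hcond.2, List.mem_append_right _ (by simp)⟩
        · rintro ⟨_, _, _, _, hmem⟩
          rcases List.mem_append.mp hmem with hm | hm
          · exact hba_notP hm
          · simp only [List.mem_singleton, Prod.mk.injEq] at hm
            exact absurd (hm.1 ▸ hab) (Nat.lt_irrefl _)
      · by_cases hq2 : (x, y, z, w) = (i, k, j, p)
        · obtain ⟨rfl, rfl, rfl, rfl⟩ : x = i ∧ y = k ∧ z = j ∧ w = p := by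
            simpa [Prod.ext_iff] using hq2
          rw [get4N_set4N_ne _ _ _ _ _ _ _ _ _ _ (by simp [Prod.ext_iff]; omega)]
          have hru : InR4 (updB C N P) x y z w := inR4_of_sameShape hsP hri
          rw [get4N_set4N_self _ _ _ _ _ _ hru, hread_ik, hread_jp]
          rw [updB, get4N_mapCells_of_inR4 _ _ _ _ _ _ hri]
          unfold cellB
          rw [if_pos]
          exact ⟨hkN, hpN, by omega, hcond.2,
            List.mem_append_right _ (by simp)⟩
        · rw [get4N_set4N_ne _ _ _ _ _ _ _ _ _ _ hq1, get4N_set4N_ne _ _ _ _ _ _ _ _ _ _ hq2]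
          apply get4N_updB_congr
          intro v
          have hc1 : (y < N ∧ w < N ∧ z ≠ x ∧ w ≠ y ∧
              (x * N + y, z * N + w) ∈ P ++ [(i * N + k, j * N + p)]) ↔
              (y < N ∧ w < N ∧ z ≠ x ∧ w ≠ y ∧ (x * N + y, z * N + w) ∈ P) := by
            constructor
            · rintro ⟨hy, hw, hzx, hwy, hmem⟩
              refine ⟨hy, hw, hzx, hwy, ?_⟩
              rcases List.mem_append.mp hmem with hm | hm
              · exact hm
              · exfalso
                simp only [List.mem_singleton, Prod.mk.injEq] at hm
                obtain ⟨hxi, hyk⟩ := encode_inj hy hkN hm.1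
                obtain ⟨hzj, hwp⟩ := encode_inj hw hpN hm.2
                exact hq2 (by simp [hxi, hyk, hzj, hwp])
            · rintro ⟨hy, hw, hzx, hwy, hmem⟩
              exact ⟨hy, hw, hzx, hwy, List.mem_append_left _ hmem⟩
          have hc2 : (y < N ∧ w < N ∧ x ≠ z ∧ y ≠ w ∧
              (z * N + w, x * N + y) ∈ P ++ [(i * N + k, j * N + p)]) ↔
              (y < N ∧ w < N ∧ x ≠ z ∧ y ≠ w ∧ (z * N + w, x * N + y) ∈ P) := by
            constructor
            · rintro ⟨hy, hw, hxz, hyw, hmem⟩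
              refine ⟨hy, hw, hxz, hyw, ?_⟩
              rcases List.mem_append.mp hmem with hm | hm
              · exact hm
              · exfalso
                simp only [List.mem_singleton, Prod.mk.injEq] at hm
                obtain ⟨hzi, hwk⟩ := encode_inj hw hkN hm.1
                obtain ⟨hxj, hyp⟩ := encode_inj hy hpN hm.2
                exact hq1 (by simp [hxj, hyp, hzi, hwk])
            · rintro ⟨hy, hw, hxz, hyw, hmem⟩
              exact ⟨hy, hw, hxz, hyw, List.mem_append_left _ hmem⟩
          unfold cellB
          simp only [hc1, hc2]
  · rw [if_neg hcond]
    unfold updB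
    apply mapCells_congr
    intro x y z w v
    have hc1 : (y < N ∧ w < N ∧ z ≠ x ∧ w ≠ y ∧
        (x * N + y, z * N + w) ∈ P ++ [(i * N + k, j * N + p)]) ↔
        (y < N ∧ w < N ∧ z ≠ x ∧ w ≠ y ∧ (x * N + y, z * N + w) ∈ P) := by
      constructor
      · rintro ⟨hy, hw, hzx, hwy, hmem⟩
        refine ⟨hy, hw, hzx, hwy, ?_⟩
        rcases List.mem_append.mp hmem with hm | hm
        · exact hm
        · exfalso
          simp only [List.mem_singleton, Prod.mk.injEq] at hm
          obtain ⟨hxi, hyk⟩ := encode_inj hy hkN hm.1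
          obtain ⟨hzj, hwp⟩ := encode_inj hw hpN hm.2
          exact hcond ⟨by omega, by omega⟩
      · rintro ⟨hy, hw, hzx, hwy, hmem⟩
        exact ⟨hy, hw, hzx, hwy, List.mem_append_left _ hmem⟩
    have hc2 : (y < N ∧ w < N ∧ x ≠ z ∧ y ≠ w ∧
        (z * N + w, x * N + y) ∈ P ++ [(i * N + k, j * N + p)]) ↔
        (y < N ∧ w < N ∧ x ≠ z ∧ y ≠ w ∧ (z * N + w, x * N + y) ∈ P) := by
      constructor
      · rintro ⟨hy, hw, hxz, hyw, hmem⟩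
        refine ⟨hy, hw, hxz, hyw, ?_⟩
        rcases List.mem_append.mp hmem with hm | hm
        · exact hm
        · exfalso
          simp only [List.mem_singleton, Prod.mk.injEq] at hm
          obtain ⟨hzi, hwk⟩ := encode_inj hw hkN hm.1
          obtain ⟨hxj, hyp⟩ := encode_inj hy hpN hm.2
          exact hcond ⟨by omega, by omega⟩
      · rintro ⟨hy, hw, hxz, hyw, hmem⟩
        exact ⟨hy, hw, hxz, hyw, List.mem_append_left _ hmem⟩
    unfold cellB
    simp only [hc1, hc2]

lemma updB_nil (C : List (List (List (List Int)))) (N : Nat) : updB C N [] = C := by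
  unfold updB
  rw [mapCells_congr C _ (fun _ _ _ _ v => v) (by
    intro a b c d v
    apply cellB_identity
    · rintro ⟨_, _, _, _, hmem⟩; exact List.not_mem_nil hmem
    · rintro ⟨_, _, _, _, hmem⟩; exact List.not_mem_nil hmem), mapCells_id]

lemma PBpairs_le_one (N : Nat) (h : N ≤ 1) : PBpairs N = [] := by
  have h01 : N = 0 ∨ N = 1 := by omega
  rcases h01 with rfl | rfl <;> rfl

lemma foldB_inv {N : Nat} (hN : 0 < N) (C : List (List (List (List Int))))
    (hSh : pvShapeOk N C) :
    ∀ (S P : List (Nat × Nat)), PBpairs N = P ++ S →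
      S.foldl (stepP N) (updB C N P) = updB C N (P ++ S) := by
  intro S
  induction S with
  | nil => intro P h; simp
  | cons q S' ih =>
    intro P hPS
    obtain ⟨a, b⟩ := q
    have hmemq : (a, b) ∈ PBpairs N := by
      rw [hPS]; exact List.mem_append_right _ (List.mem_cons_self ..)
    have hb := mem_PBpairs.mp hmemq
    have hpw := pairwise_PBpairs N
    rw [hPS, List.pairwise_append] at hpw
    have hcross := hpw.2.2
    have hqP : (a, b) ∉ P := by
      intro hmem
      have := hcross _ hmem _ (List.mem_cons_self ..)
      simp [plt] at this
    have hPsub : ∀ x ∈ P, x.1 < x.2 ∧ x.2 < N * N := by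
      intro x hx
      have hxq : x ∈ PBpairs N := by rw [hPS]; exact List.mem_append_left _ hx
      obtain ⟨x1, x2⟩ := x
      exact mem_PBpairs.mp hxq
    have hea : (a / N) * N + a % N = a := decode_encode hN
    have heb : (b / N) * N + b % N = b := decode_encode hN
    have hkN : a % N < N := Nat.mod_lt _ hN
    have hpN : b % N < N := Nat.mod_lt _ hN
    have hjN : b / N < N := (Nat.div_lt_iff_lt_mul hN).mpr hb.2
    have hiN : a / N < N := (Nat.div_lt_iff_lt_mul hN).mpr (by omega)
    rw [List.foldl_cons]
    have hstep := stepP_updB C N P (a / N) (a % N) (b / N) (b % N) hkN hpN hiN hjN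
      (by rw [hea, heb]; exact hb.1) hSh hPsub (by rw [hea, heb]; exact hqP)
    rw [hea, heb] at hstep
    rw [hstep]
    have hAssoc := ih (P ++ [(a, b)]) (by rw [hPS]; simp)
    rw [hAssoc]; simp

lemma updB_eq_upd (N : Nat) (C : List (List (List (List Int)))) :
    updB C N (PBpairs N) = upd C (quadsN N) := by
  unfold updB upd
  apply mapCells_congr
  intro x y z w v
  unfold cellB updCell
  by_cases hy : y < N
  · by_cases hw : w < N
    · rcases Nat.lt_trichotomy x z with hlt | heq | hgt
      · have e1 := encode_lt_iff (show z ≠ x by omega) hy hw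
        have e2 := encode_lt_sq (N := N) (z := z) hw
        have e3 := encode_lt_iff (show x ≠ z by omega) hw hy
        have e4 := encode_lt_sq (N := N) (z := x) hy
        simp only [mem_PBpairs, mem_quadsN, e1, e2, e3, e4]
        split_ifs <;> first | rfl | omega
      · rw [if_neg (by rintro ⟨_, _, h, _⟩; omega),
          if_neg (by rintro ⟨_, _, h, _⟩; omega),
          if_neg (by intro hmem; have := mem_quadsN.mp hmem; omega)]
      · have e1 := encode_lt_iff (show z ≠ x by omega) hy hw
        have e2 := encode_lt_sq (N := N) (z := z) hw
        have e3 := encode_lt_iff (show x ≠ z by omega) hw hy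
        have e4 := encode_lt_sq (N := N) (z := x) hy
        simp only [mem_PBpairs, mem_quadsN, e1, e2, e3, e4]
        split_ifs <;> first | rfl | omega
    · rw [if_neg (by rintro ⟨_, h, _⟩; exact hw h),
        if_neg (by rintro ⟨_, h, _⟩; exact hw h),
        if_neg (by intro hmem; exact hw (mem_quadsN.mp hmem).2.2.2.2.1)]
  · rw [if_neg (by rintro ⟨h, _⟩; exact hy h),
      if_neg (by rintro ⟨h, _⟩; exact hy h),
      if_neg (by intro hmem; exact hy (mem_quadsN.mp hmem).2.1)]

lemma B_eq_fold (N : Nat) (C : List (List (List (List Int)))) :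
    junta_elementos_complementares_alt (N : Int) C = (PBpairs N).foldl (stepP N) C := by
  unfold junta_elementos_complementares_alt PBpairs
  have hnn : (N : Int) * (N : Int) = ((N * N : Nat) : Int) := by push_cast; ring
  simp only [hnn, PySem.List.pyRange_zero_natCast, List.foldl_map, List.foldl_flatMap]
  apply PySem.List.foldl_congr_mem
  intro m A hA
  rw [List.mem_range] at hA
  rw [PySem.List.pyRange_one]
  have hlen : (((N * N : Nat) : Int) - ((A : Int) + 1)).toNat = N * N - (A + 1) := by omega
  rw [hlen, List.foldl_map]
  apply PySem.List.foldl_congr_mem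
  intro m' t ht
  rw [List.mem_range] at ht
  have hbcast : (A : Int) + 1 + (t : Int) = ((A + 1 + t : Nat) : Int) := by push_cast; ring
  rw [hbcast]
  simp only [PySem.Int.floordiv_natCast, PySem.Int.mod_natCast, stepP, ne_eq, Nat.cast_inj,
    get4_natCast, set4_natCast]

lemma B_neg_one (C : List (List (List (List Int)))) :
    junta_elementos_complementares_alt (-1) C = C := by
  unfold junta_elementos_complementares_alt
  norm_num [PySem.List.pyRange_one, List.range_succ, PySem.List.pyRange_one_eq_nil]

-- ===== VERDICT (by name: the statement is the Claim_ definition above) =====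
theorem junta_elementos_complementares_spec : Claim_equal_junta_elementos_complementares := by
  intro n C _ hPre
  obtain ⟨hn1, hrest⟩ := hPre
  unfold Spec_junta_elementos_complementares
  by_cases hn0 : 0 ≤ n
  swap
  · have hneg : n = -1 := by omega
    subst hneg
    rw [B_neg_one, A_eq_fold]
    rfl
  obtain ⟨N, rfl⟩ : ∃ N : Nat, n = (N : Int) := ⟨n.toNat, (Int.toNat_of_nonneg hn0).symm⟩
  rw [A_eq_fold, B_eq_fold]
  rw [Int.toNat_natCast] at hrest ⊢
  by_cases hN1 : N ≤ 1
  · rw [quadsN_le_one N hN1, PBpairs_le_one N hN1]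
    rfl
  · have hSh : pvShapeOk N C := by
      rcases hrest with h | h
      · exfalso
        have : N ≤ 1 := by exact_mod_cast h
        omega
      · exact h
    have hN : 0 < N := by omega
    have hA := fold_inv C hSh (quadsN N) [] (by simp)
    rw [upd_nil] at hA
    have hB := foldB_inv hN C hSh (PBpairs N) [] (by simp)
    rw [updB_nil] at hB
    rw [hA, hB]
    simpa using (updB_eq_upd N C).symm
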